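-- pv_equiv track=rewrite | github.com/pacman-city/CodePuzzles | other/binary_sum.py | sum_binaries
-- ===== SOURCE A (Python) =====
-- def sum_binaries(num_tuple):
--     """
--     Суммирует двоичные числа
--
--     АЛГОРИТМ:
--
--     i          - счетчик итераций
--     sum_bin    - результат(tuple)
--     remaining  - 1 или 0, текущий регистр суммы
--     s          - сумма в текущей итерации = over + сумма цифр текущего регистра
--     over       - количество единиц, которое нужно добавить в следующий регистр суммы
--
--     Вычисляем всех сумму цифр для текущего регистра (s).
--     Находим число единиц, которое нужно добавить в следующий регистр (over).
--     Находим цифру, которую необходимо поместить в текущий регистр (remaining).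
--     Добавляем в результат (sum_bin) текущее значение из remaining (0 или 1)
--     увеличиваем счетчик
--
--     Повторяем, пока не переберем максимальное число из полученных аргументов или over > 0
--
--     Сумма s:
--     == сумма цифр + over
--     ИЛИ
--     == over - если перебраны все аргументы из num_tuple
--     """
--     length = len(num_tuple)
--
--     i = 0
--     over = 0
--     sum_bin = ()
--     while over > 0 or i < length:
--         s = over if i >= length else sum(int(i) for i in num_tuple[i]) + over
--         over = s // 2
--         remaining = s % 2
--         sum_bin += (remaining,)
--         i += 1
--
--     return sum_bin
-- ===== SOURCE B (Python) =====
-- def sum_binaries(num_tuple):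
--     # Build one accumulator integer column-by-column, then read its bits back out.
--     n = 0
--     for i, col in enumerate(num_tuple):
--         n += sum(int(d) for d in col) << i
--     width = max(len(num_tuple), n.bit_length() if n > 0 else 0)
--     return tuple((n >> j) & 1 for j in range(width))
-- ===== Notes on version B (the rewrite author's own statement) =====
-- stated objective: alternative
-- what changed: Instead of interleaving per-column carry propagation with output emission, B folds all columns into one accumulator integer N = sum(colsum_i << i) and then reads the result back out bit by bit as (N >> j) & 1 for j up to max(len, N.bit_length()).
import Mathlib
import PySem

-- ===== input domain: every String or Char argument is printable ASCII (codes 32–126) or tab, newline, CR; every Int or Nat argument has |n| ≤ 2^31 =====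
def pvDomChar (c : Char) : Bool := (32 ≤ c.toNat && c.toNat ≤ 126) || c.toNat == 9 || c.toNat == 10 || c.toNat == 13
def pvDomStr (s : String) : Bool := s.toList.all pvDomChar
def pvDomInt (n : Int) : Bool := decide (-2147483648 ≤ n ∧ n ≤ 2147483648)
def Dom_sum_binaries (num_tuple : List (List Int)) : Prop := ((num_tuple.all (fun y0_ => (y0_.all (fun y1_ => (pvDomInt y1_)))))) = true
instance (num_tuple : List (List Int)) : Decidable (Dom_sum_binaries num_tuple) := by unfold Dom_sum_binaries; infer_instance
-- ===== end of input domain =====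

-- B replaces A's interleaved carry propagation by building one accumulator integer and
-- reading its bits back out (alternative decomposition, same cost); A and B agree everywhere.

-- ===== PORT A =====
-- sum(int(i) for i in col): the elements are already ints, so int(i) is the identity
def pvColSum (col : List Int) : Int := col.foldl (fun a d => a + d) 0

-- the while loop after i has reached length: only 'ov > 0' keeps it running
def sum_binaries_drain (ov : Int) : List Int :=
  if _h : 0 < ov then
    PySem.Int.mod ov 2 :: sum_binaries_drain (PySem.Int.floordiv ov 2)
  else []
termination_by ov.toNat
decreasing_by
  rw [PySem.Int.floordiv_eq_ediv_of_pos (by omega)]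
  omega

-- the while loop ov the columns (i < length), carrying 'ov'
def sum_binaries_cols : List (List Int) → Int → List Int
  | [], ov => sum_binaries_drain ov
  | col :: rest, ov =>
    let s := pvColSum col + ov
    PySem.Int.mod s 2 :: sum_binaries_cols rest (PySem.Int.floordiv s 2)

def sum_binaries (num_tuple : List (List Int)) : List Int :=
  sum_binaries_cols num_tuple 0

-- ===== PORT B =====
-- n.bit_length() is ported as PySem.Int.bitLength (exact)
def sum_binaries_alt (num_tuple : List (List Int)) : List Int :=
  let n : Int := (PySem.List.enumerate num_tuple 0).foldl
      (fun ac p => ac + ((p.2.foldl (fun (a : Int) d => a + d) 0) <<< p.1.toNat)) 0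
  let width : Nat := max num_tuple.length (if 0 < n then PySem.Int.bitLength n else 0)
  (List.range width).map (fun (j : Nat) => PySem.Int.band (n >>> j) 1)

-- ===== PRECONDITION & SPEC =====
def Spec_sum_binaries (num_tuple : List (List Int)) (out : List Int) : Prop := out = sum_binaries_alt num_tuple
instance (num_tuple : List (List Int)) (out : List Int) : Decidable (Spec_sum_binaries num_tuple out) := by unfold Spec_sum_binaries; infer_instance

-- ===== CLAIM (what is proved, stated in full; the proofs are below) =====
def Claim_equal_sum_binaries : Prop := ∀ (num_tuple : List (List Int)), Dom_sum_binaries num_tuple → Spec_sum_binaries num_tuple (sum_binaries num_tuple)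

-- ===== LEMMAS AND PROOFS =====

-- the low 'w' bits of 'n', LSB first (ediv/emod form; proof-side canonical object)
def pvBits (n : Int) (w : Nat) : List Int :=
  (List.range w).map (fun j => n / 2^j % 2)

-- bit length, 0 for nonpositive input (proof-side)
def pvBL (n : Int) : Nat := if 0 < n then PySem.Int.bitLength n else 0

-- the value Σ colsum_i · 2^i (proof-side)
def pvS : List (List Int) → Int
  | [] => 0
  | c :: r => pvColSum c + 2 * pvS r

lemma pvBits_succ (n : Int) (w : Nat) :
    pvBits n (w + 1) = n % 2 :: pvBits (n / 2) w := by
  unfold pvBits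
  rw [List.range_succ_eq_map, List.map_cons, List.map_map]
  refine congrArg₂ _ (by norm_num) (List.map_congr_left fun j _ => ?_)
  simp only [Function.comp_apply, Nat.succ_eq_add_one]
  rw [show n / 2 / 2^j = n / 2^(j+1) by
        rw [Int.ediv_ediv_of_nonneg (by norm_num), pow_succ, mul_comm]]

lemma pvBL_pos (n : Int) (h : 0 < n) : pvBL n = pvBL (n / 2) + 1 := by
  have h2 := PySem.Int.bitLength_of_pos h
  rw [PySem.Int.floordiv_eq_ediv_of_pos (by omega)] at h2
  unfold pvBL
  rcases Int.lt_or_le 0 (n / 2) with hq | hq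
  · simp [h, hq, h2]
  · have : n / 2 = 0 := by omega
    simp [h, h2, this, PySem.Int.bitLength_zero]

lemma pvBL_nonpos (n : Int) (h : n ≤ 0) : pvBL n = 0 := by
  unfold pvBL; simp [not_lt.mpr h]

-- the drain phase produces exactly the bits of 'ov', pvBL ov many of them
lemma drain_eq_bits (ov : Int) : sum_binaries_drain ov = pvBits ov (pvBL ov) := by
  by_cases h : 0 < ov
  · rw [sum_binaries_drain, dif_pos h, pvBL_pos ov h, pvBits_succ,
        PySem.Int.mod_eq_emod_of_pos (by omega), PySem.Int.floordiv_eq_ediv_of_pos (by omega)]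
    have : (ov / 2).toNat < ov.toNat := by omega
    rw [drain_eq_bits (ov / 2)]
  · rw [sum_binaries_drain, dif_neg h, pvBL_nonpos ov (by omega)]
    rfl
termination_by ov.toNat
decreasing_by
  omega

lemma width_step (M : Int) (len : Nat) :
    max (len + 1) (pvBL M) = max len (pvBL (M / 2)) + 1 := by
  rcases Int.lt_or_le 0 M with h | h
  · have := pvBL_pos M h
    omega
  · have h2 : M / 2 ≤ 0 := by omega
    rw [pvBL_nonpos M h, pvBL_nonpos _ h2]
    omega

-- the column phase: A's output is the low max(length, bitlen) bits of ov + Σ colsum_i·2^i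
lemma cols_eq_bits (cols : List (List Int)) (ov : Int) :
    sum_binaries_cols cols ov
      = pvBits (ov + pvS cols) (max cols.length (pvBL (ov + pvS cols))) := by
  induction cols generalizing ov with
  | nil =>
    simp only [sum_binaries_cols, pvS, add_zero, List.length_nil, Nat.zero_max]
    exact drain_eq_bits ov
  | cons c r ih =>
    simp only [sum_binaries_cols, pvS]
    set s := pvColSum c + ov with hs
    set M := ov + (pvColSum c + 2 * pvS r) with hM
    have hMs : M = s + 2 * pvS r := by omega
    have hmod : PySem.Int.mod s 2 = M % 2 := by
      rw [PySem.Int.mod_eq_emod_of_pos (by omega)]; omega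
    have hdiv : PySem.Int.floordiv s 2 + pvS r = M / 2 := by
      rw [PySem.Int.floordiv_eq_ediv_of_pos (by omega)]; omega
    rw [ih, hdiv, List.length_cons, width_step M r.length, pvBits_succ, hmod]

-- B's accumulator fold computes 2^(start bookkeeping) · pvS; stated for start index 0 shifted
lemma enum_fold (cols : List (List Int)) (k : Nat) (acc : Int) :
    (PySem.List.enumerate cols (k : Int)).foldl
        (fun ac p => ac + ((p.2.foldl (fun (a : Int) d => a + d) 0) <<< p.1.toNat)) acc
      = acc + 2^k * pvS cols := by
  induction cols generalizing k acc with
  | nil => simp [PySem.List.enumerate_nil, pvS]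
  | cons c r ih =>
    rw [PySem.List.enumerate_cons, List.foldl_cons]
    have : ((k : Int) + 1) = ((k + 1 : Nat) : Int) := by push_cast; ring
    rw [this, ih]
    have htn : ((k : Int)).toNat = k := Int.toNat_natCast k
    rw [htn, Int.shiftLeft_eq, pvS]
    simp only [pvColSum]
    ring

lemma alt_eq_bits (nt : List (List Int)) :
    sum_binaries_alt nt = pvBits (pvS nt) (max nt.length (pvBL (pvS nt))) := by
  unfold sum_binaries_alt
  have hn : (PySem.List.enumerate nt 0).foldl
      (fun ac p => ac + ((p.2.foldl (fun (a : Int) d => a + d) 0) <<< p.1.toNat)) 0 = pvS nt := by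
    have := enum_fold nt 0 0
    simpa using this
  simp only [hn]
  unfold pvBits pvBL
  refine List.map_congr_left fun j _ => ?_
  rw [PySem.Int.band_one, PySem.Int.mod_eq_emod_of_pos (by omega),
      Int.shiftRight_eq_div_pow]
  push_cast
  ring_nf

-- ===== VERDICT (by name: the statement is the Claim_ definition above) =====
theorem sum_binaries_spec : Claim_equal_sum_binaries := by
  intro nt _
  unfold Spec_sum_binaries sum_binaries
  rw [cols_eq_bits nt 0, alt_eq_bits nt, zero_add]
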